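-- pv_equiv track=rewrite | github.com/pypi-data/pypi-mirror-285 | packages/docugenr8-svg/docugenr8_svg-0.0.1-py3-none-any.whl/docugenr8_svg/selector_functions.py | get_simple_selectors
-- ===== SOURCE A (Python) =====
-- def get_simple_selectors(composite_selector: str) -> list[str]:
--     tokens: list[str] = []
--     current_token = ""
--     i = 0
--     while i < len(composite_selector):
--         char = composite_selector[i]
--
--         if char in {".", "#", "[", "*"}:
--             if current_token:
--                 tokens.append(current_token)
--                 current_token = ""
--             current_token += char
--         elif char in {":"}:
--             if current_token:
--                 tokens.append(current_token)
--                 current_token = ""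
--             current_token += char
--             if i + 1 < len(composite_selector):
--                 if composite_selector[i + 1] == ":":
--                     current_token += composite_selector[i + 1]
--                     i += 1
--         else:
--             current_token += char
--         i += 1
--
--     if current_token:
--         tokens.append(current_token)
--
--     return tokens
-- ===== SOURCE B (Python) =====
-- def get_simple_selectors(composite_selector: str) -> list[str]:
--     DELIMS = ".#[*:"
--
--     def split_plain(s: str) -> tuple[str, str]:
--         for k, c in enumerate(s):
--             if c in DELIMS:
--                 return s[:k], s[k:]
--         return s, ""
--
--     tokens: list[str] = []
--     plain, rest = split_plain(composite_selector)
--     if plain: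
--         tokens.append(plain)
--     while rest:
--         head = "::" if rest.startswith("::") else rest[0]
--         body, rest = split_plain(rest[len(head):])
--         tokens.append(head + body)
--     return tokens
-- ===== Notes on version B (the rewrite author's own statement) =====
-- stated objective: faster
-- what changed: Replaced A's character-at-a-time while-loop state machine (current_token/tokens accumulators with an in-loop index bump for '::') by a span-based tokenizer that splits off the leading plain run and then repeatedly emits one delimiter head ('::' or a single delimiter) plus its following plain run as whole slices, removing the per-character string concatenation.
import Mathlib
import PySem

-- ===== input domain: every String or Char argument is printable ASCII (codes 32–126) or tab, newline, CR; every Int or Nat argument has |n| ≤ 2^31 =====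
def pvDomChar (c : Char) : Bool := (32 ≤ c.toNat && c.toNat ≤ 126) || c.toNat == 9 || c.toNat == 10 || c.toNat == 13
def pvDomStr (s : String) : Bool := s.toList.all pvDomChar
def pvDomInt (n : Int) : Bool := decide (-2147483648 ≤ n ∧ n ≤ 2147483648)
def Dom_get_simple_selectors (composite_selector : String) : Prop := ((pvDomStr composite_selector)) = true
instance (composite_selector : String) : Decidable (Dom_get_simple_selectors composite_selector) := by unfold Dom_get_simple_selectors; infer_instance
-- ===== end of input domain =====

-- B replaces A's index-driven while-loop state machine (current_token/tokens
-- accumulators) by a span-based tokenizer: split off the leading plain run, then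
-- repeatedly emit one delimiter head ('::' or a single delimiter) plus its plain
-- body as whole slices (no per-character string concatenation); objective:
-- faster (measured).

-- ===== PORT A =====
-- A's while loop over indices, as recursion over the character list with the
-- same state (current_token = cur, tokens = toks); the `composite_selector[i+1]
-- == ':'` lookahead (guarded by i+1 < len) becomes the head? test on the tail.
def pvGoA : List Char → List Char → List (List Char) → List (List Char)
  | [], cur, toks => if cur.isEmpty then toks else toks ++ [cur]
  | c :: rest, cur, toks =>
    if c = '.' || c = '#' || c = '[' || c = '*' then
      pvGoA rest [c] (if cur.isEmpty then toks else toks ++ [cur])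
    else if c = ':' then
      if rest.head? = some ':' then
        pvGoA rest.tail [c, ':'] (if cur.isEmpty then toks else toks ++ [cur])
      else
        pvGoA rest [c] (if cur.isEmpty then toks else toks ++ [cur])
    else
      pvGoA rest (cur ++ [c]) toks
termination_by cs _ _ => cs.length
decreasing_by all_goals simp

def get_simple_selectors (composite_selector : String) : List String :=
  (pvGoA composite_selector.toList [] []).map String.ofList

-- ===== PORT B =====
-- split_plain(s) = (takeWhile, dropWhile) on the non-delimiter predicate
def pvNotDelim (c : Char) : Bool :=
  !(c = '.' || c = '#' || c = '[' || c = '*' || c = ':')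


-- B's while loop: one token per iteration (head ++ body), recursing on the rest
def pvGoB : List Char → List (List Char)
  | [] => []
  | c :: rest =>
    if c = ':' && rest.head? = some ':' then
      (c :: ':' :: rest.tail.takeWhile pvNotDelim) :: pvGoB (rest.tail.dropWhile pvNotDelim)
    else
      (c :: rest.takeWhile pvNotDelim) :: pvGoB (rest.dropWhile pvNotDelim)
termination_by l => l.length
decreasing_by
  · have h1 := List.length_dropWhile_le (p := pvNotDelim) rest.tail
    simp [List.length_tail] at h1 ⊢; omega
  · have h1 := List.length_dropWhile_le (p := pvNotDelim) rest; simp; omega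

def get_simple_selectors_alt (composite_selector : String) : List String :=
  let cs := composite_selector.toList
  let plain := cs.takeWhile pvNotDelim
  let rest := cs.dropWhile pvNotDelim
  ((if plain.isEmpty then [] else [plain]) ++ pvGoB rest).map String.ofList

-- ===== PRECONDITION & SPEC =====
def Spec_get_simple_selectors (composite_selector : String) (out : List String) : Prop := out = get_simple_selectors_alt composite_selector
instance (composite_selector : String) (out : List String) : Decidable (Spec_get_simple_selectors composite_selector out) := by unfold Spec_get_simple_selectors; infer_instance

-- ===== CLAIM (what is proved, stated in full; the proofs are below) =====
def Claim_equal_get_simple_selectors : Prop := ∀ (composite_selector : String), Dom_get_simple_selectors composite_selector → Spec_get_simple_selectors composite_selector (get_simple_selectors composite_selector)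

-- ===== LEMMAS AND PROOFS =====

theorem pvGoA_acc (cs cur : List Char) (toks : List (List Char)) :
    pvGoA cs cur toks = toks ++ pvGoA cs cur [] := by
  match cs with
  | [] => simp only [pvGoA]; split <;> simp
  | c :: rest =>
    rw [pvGoA.eq_def]
    conv_rhs => rw [pvGoA.eq_def]
    by_cases hd : (c = '.' || c = '#' || c = '[' || c = '*') = true
    · simp only [hd, if_pos, List.nil_append]
      rw [pvGoA_acc rest [c] (if cur.isEmpty then toks else toks ++ [cur]),
          pvGoA_acc rest [c] (if cur.isEmpty then [] else [cur])]
      split <;> simp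
    · simp only [hd, Bool.false_eq_true, if_false, List.nil_append]
      by_cases hc : c = ':'
      · simp only [hc, if_true]
        by_cases h2 : rest.head? = some ':'
        · simp only [h2, if_pos]
          rw [pvGoA_acc rest.tail [':', ':'] (if cur.isEmpty then toks else toks ++ [cur]),
              pvGoA_acc rest.tail [':', ':'] (if cur.isEmpty then [] else [cur])]
          split <;> simp
        · simp only [h2, if_false]
          rw [pvGoA_acc rest [':'] (if cur.isEmpty then toks else toks ++ [cur]),
              pvGoA_acc rest [':'] (if cur.isEmpty then [] else [cur])]
          split <;> simp
      · simp only [hc, Bool.false_eq_true, if_false]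
        exact pvGoA_acc rest (cur ++ [c]) toks
termination_by cs.length
decreasing_by all_goals simp

theorem pvGoA_main (cs cur : List Char) (h : ¬ cur.isEmpty = true) :
    pvGoA cs cur [] =
      (cur ++ cs.takeWhile pvNotDelim) :: pvGoB (cs.dropWhile pvNotDelim) := by
  match cs with
  | [] => simp [pvGoA, pvGoB, h]
  | c :: rest =>
    rw [pvGoA.eq_def]
    by_cases hd : (c = '.' || c = '#' || c = '[' || c = '*') = true
    · have hnd : pvNotDelim c = false := by
        rcases (by simpa using hd : ((c = '.' ∨ c = '#') ∨ c = '[') ∨ c = '*') with (((h'|h')|h')|h') <;> subst h' <;> decide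
      have hcc : (c = ':') = False := by
        rcases (by simpa using hd : ((c = '.' ∨ c = '#') ∨ c = '[') ∨ c = '*') with (((h'|h')|h')|h') <;> subst h' <;> decide
      simp only [hd, if_pos, h, Bool.false_eq_true, if_false, List.nil_append]
      rw [pvGoA_acc rest [c] [cur], pvGoA_main rest [c] (by simp)]
      simp [List.takeWhile_cons, List.dropWhile_cons, hnd, h]
      conv_rhs => rw [pvGoB.eq_def]
      simp [hcc]
    · simp only [hd, Bool.false_eq_true, if_false]
      by_cases hc : c = ':'
      · subst hc
        by_cases h2 : rest.head? = some ':'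
        · simp only [h2, if_pos, if_true, decide_true, h, Bool.false_eq_true, if_false, List.nil_append]
          rw [pvGoA_acc rest.tail [':', ':'] [cur], pvGoA_main rest.tail [':', ':'] (by simp)]
          have hnd : pvNotDelim ':' = false := by decide
          simp [List.takeWhile_cons, List.dropWhile_cons, hnd, h]
          conv_rhs => rw [pvGoB.eq_def]
          simp [h2]
        · simp only [h2, if_true, decide_true, if_false, h, Bool.false_eq_true, List.nil_append]
          rw [pvGoA_acc rest [':'] [cur], pvGoA_main rest [':'] (by simp)]
          have hnd : pvNotDelim ':' = false := by decide
          simp [List.takeWhile_cons, List.dropWhile_cons, hnd, h]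
          conv_rhs => rw [pvGoB.eq_def]
          simp [h2]
      · have hnd : pvNotDelim c = true := by
          simp [pvNotDelim] at hd ⊢; simp [hc]; tauto
        simp only [hc, Bool.false_eq_true, if_false, decide_false]
        rw [pvGoA_main rest (cur ++ [c]) (by simp)]
        simp [List.takeWhile_cons, List.dropWhile_cons, hnd]
termination_by cs.length
decreasing_by all_goals simp [List.length_tail] <;> omega

theorem pvGoA_top (cs : List Char) :
    pvGoA cs [] [] =
      (if (cs.takeWhile pvNotDelim).isEmpty then [] else [cs.takeWhile pvNotDelim]) ++
        pvGoB (cs.dropWhile pvNotDelim) := by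
  cases cs with
  | nil => simp [pvGoA, pvGoB]
  | cons c rest =>
    rw [pvGoA.eq_def]
    by_cases hd : (c = '.' || c = '#' || c = '[' || c = '*') = true
    · have hnd : pvNotDelim c = false := by
        rcases (by simpa using hd : ((c = '.' ∨ c = '#') ∨ c = '[') ∨ c = '*') with (((h'|h')|h')|h') <;> subst h' <;> decide
      have hcc : (c = ':') = False := by
        rcases (by simpa using hd : ((c = '.' ∨ c = '#') ∨ c = '[') ∨ c = '*') with (((h'|h')|h')|h') <;> subst h' <;> decide
      simp only [hd, if_pos, List.isEmpty_nil, if_true, List.nil_append]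
      rw [pvGoA_main rest [c] (by simp)]
      simp [List.takeWhile_cons, List.dropWhile_cons, hnd]
      conv_rhs => rw [pvGoB.eq_def]
      simp [hcc]
    · simp only [hd, Bool.false_eq_true, if_false]
      by_cases hc : c = ':'
      · subst hc
        by_cases h2 : rest.head? = some ':'
        · simp only [h2, if_pos, if_true, decide_true, List.isEmpty_nil, List.nil_append]
          rw [pvGoA_main rest.tail [':', ':'] (by simp)]
          have hnd : pvNotDelim ':' = false := by decide
          simp [List.takeWhile_cons, List.dropWhile_cons, hnd]
          conv_rhs => rw [pvGoB.eq_def]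
          simp [h2]
        · simp only [h2, if_true, decide_true, if_false, List.isEmpty_nil, List.nil_append]
          rw [pvGoA_main rest [':'] (by simp)]
          have hnd : pvNotDelim ':' = false := by decide
          simp [List.takeWhile_cons, List.dropWhile_cons, hnd]
          conv_rhs => rw [pvGoB.eq_def]
          simp [h2]
      · have hnd : pvNotDelim c = true := by
          simp [pvNotDelim] at hd ⊢; simp [hc]; tauto
        simp only [hc, Bool.false_eq_true, if_false, decide_false, List.nil_append]
        rw [pvGoA_main rest [c] (by simp)]
        simp [List.takeWhile_cons, List.dropWhile_cons, hnd]

-- ===== VERDICT (by name: the statement is the Claim_ definition above) =====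
theorem get_simple_selectors_spec : Claim_equal_get_simple_selectors := by
  intro s _
  unfold Spec_get_simple_selectors get_simple_selectors get_simple_selectors_alt
  rw [pvGoA_top]
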